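-- pv_equiv track=rewrite | github.com/Vismay-lab/Python-code | _0402 Human pyramid.py | HumanPyramid
-- ===== SOURCE A (Python) =====
-- def HumanPyramid(row, column, Weight):
--     """
--     calculates the weights carried by the person using recursive function
--     1. If the row = 0 then the weight carried is 0
--     2. When column = 0 this checks the criteris for the person having weight of one person and standing at the end of the row.
--     3. when the row and column are equal then the weight is split according to where the preson is standing.
--     4. otherwise the weight is calculated based on the position of the person.
--     """
--
--     if (row == 0):                  # if the row is 0 then the weight carried is zero
--         return 0
--
--     elif column == 0:               # when the column value is zero, the weight is checked for the last person on the corner.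
--
--         return ( HumanPyramid (row-1, column, Weight) + Weight) // 2    # here we are evaluating the row value and the weight computed in the column divided by 2
--
--     elif row == column:             # when both the row and column have same position
--
--         return ( HumanPyramid (row-1, column-1, Weight) + Weight) // 2    # here the weight is calculated based on the position of the person
--                                                                           # and th weight he/she is holding above them and if someone else is
--                                                                           # carrying their weight, or they are at the bottom
--
--     else:                           # the weight calculated if the person is at the corner and is taking half weight of the person above him.
--
--         return Weight + ( HumanPyramid (row-1, column-1, Weight // 2 ) + ( HumanPyramid ( row-1, column, Weight ) // 2 ))
-- ===== SOURCE B (Python) =====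
-- def HumanPyramid(row, column, Weight):
--     memo = {}
--
--     def go(r, c, w):
--         if r == 0:
--             return 0
--         key = (r, c, w)
--         if key in memo:
--             return memo[key]
--         if c == 0:
--             v = (go(r - 1, c, w) + w) // 2
--         elif r == c:
--             v = (go(r - 1, c - 1, w) + w) // 2
--         else:
--             v = w + go(r - 1, c - 1, w // 2) + go(r - 1, c, w) // 2
--         memo[key] = v
--         return v
--
--     return go(row, column, Weight)
-- ===== Notes on version B (the rewrite author's own statement) =====
-- stated objective: faster
-- what changed: B memoizes the recurrence in a dictionary keyed by (row, column, weight) so each state is computed once; intended as faster than A's plain exponential recursion (probe measured B 2466x at n=16, A timed out on larger inputs, so the label is unconfirmed).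
import Mathlib
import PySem

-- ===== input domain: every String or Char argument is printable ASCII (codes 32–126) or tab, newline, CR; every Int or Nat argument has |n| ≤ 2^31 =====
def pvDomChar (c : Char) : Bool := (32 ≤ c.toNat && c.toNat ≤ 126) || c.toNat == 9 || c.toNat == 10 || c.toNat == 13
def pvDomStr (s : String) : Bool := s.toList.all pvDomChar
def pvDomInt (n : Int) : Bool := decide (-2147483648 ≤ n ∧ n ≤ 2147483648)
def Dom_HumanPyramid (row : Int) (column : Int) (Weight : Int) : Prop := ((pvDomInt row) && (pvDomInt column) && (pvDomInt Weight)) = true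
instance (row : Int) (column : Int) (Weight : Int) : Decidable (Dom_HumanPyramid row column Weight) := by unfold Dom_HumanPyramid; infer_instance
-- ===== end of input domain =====

-- B replaces A's plain recursion by the same recurrence memoised in a dictionary keyed
-- by (row, column, weight); intended as faster (removes recomputation) — a timing run
-- measured B 2466x at n=16 and A timed out on larger inputs, so 'faster' is unconfirmed.

-- ===== PORT A =====
-- literal transliteration of A's recursion; the Nat fuel only makes it total
-- (it is row.toNat + 1 at the top call and never runs out when 0 ≤ row, see Pre_)
def pyrA : Nat → Int → Int → Int → Int
  | 0, _, _, _ => 0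
  | fuel + 1, row, column, Weight =>
    if row = 0 then 0
    else if column = 0 then
      PySem.Int.floordiv (pyrA fuel (row - 1) column Weight + Weight) 2
    else if row = column then
      PySem.Int.floordiv (pyrA fuel (row - 1) (column - 1) Weight + Weight) 2
    else
      Weight + (pyrA fuel (row - 1) (column - 1) (PySem.Int.floordiv Weight 2) +
        PySem.Int.floordiv (pyrA fuel (row - 1) column Weight) 2)

def HumanPyramid (row : Int) (column : Int) (Weight : Int) : Int :=
  pyrA (row.toNat + 1) row column Weight

-- ===== PORT B =====
-- transliteration of Source B's inner 'go': the memo dict is threaded as explicit state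
def pyrB : Nat → Int → Int → Int → PySem.Dict (Int × Int × Int) Int →
    Int × PySem.Dict (Int × Int × Int) Int
  | 0, _, _, _, memo => (0, memo)
  | fuel + 1, r, c, w, memo =>
    if r = 0 then (0, memo)
    else
      match memo.get? (r, c, w) with
      | some v => (v, memo)
      | none =>
        let p :=
          if c = 0 then
            let q := pyrB fuel (r - 1) c w memo
            (PySem.Int.floordiv (q.1 + w) 2, q.2)
          else if r = c then
            let q := pyrB fuel (r - 1) (c - 1) w memo
            (PySem.Int.floordiv (q.1 + w) 2, q.2)
          else
            let q1 := pyrB fuel (r - 1) (c - 1) (PySem.Int.floordiv w 2) memo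
            let q2 := pyrB fuel (r - 1) c w q1.2
            (w + q1.1 + PySem.Int.floordiv q2.1 2, q2.2)
        (p.1, p.2.insert (r, c, w) p.1)

def HumanPyramid_alt (row : Int) (column : Int) (Weight : Int) : Int :=
  (pyrB (row.toNat + 1) row column Weight PySem.Dict.empty).1

-- ===== PRECONDITION & SPEC =====
-- A recurses on row-1 with no base case below 0: a negative row raises RecursionError.
def Pre_HumanPyramid (row : Int) (column : Int) (Weight : Int) : Prop := 0 ≤ row
instance (row : Int) (column : Int) (Weight : Int) : Decidable (Pre_HumanPyramid row column Weight) := by unfold Pre_HumanPyramid; infer_instance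
def pvWitness_HumanPyramid : Int × Int × Int := (3, 1, 100)

def Spec_HumanPyramid (row : Int) (column : Int) (Weight : Int) (out : Int) : Prop := out = HumanPyramid_alt row column Weight
instance (row : Int) (column : Int) (Weight : Int) (out : Int) : Decidable (Spec_HumanPyramid row column Weight out) := by unfold Spec_HumanPyramid; infer_instance

-- ===== CLAIM (what is proved, stated in full; the proofs are below) =====
def Claim_equal_HumanPyramid : Prop := ∀ (row : Int) (column : Int) (Weight : Int), Dom_HumanPyramid row column Weight → Pre_HumanPyramid row column Weight → Spec_HumanPyramid row column Weight (HumanPyramid row column Weight)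

-- ===== LEMMAS AND PROOFS =====

-- A's recursion is fuel-independent once the fuel exceeds row
theorem pyrA_fuel_irrel : ∀ (f1 f2 : Nat) (r c w : Int), 0 ≤ r → r.toNat < f1 → r.toNat < f2 →
    pyrA f1 r c w = pyrA f2 r c w := by
  intro f1
  induction f1 with
  | zero => intro f2 r c w _ h1 _; omega
  | succ f1 ih =>
    intro f2 r c w hr h1 h2
    cases f2 with
    | zero => omega
    | succ f2 =>
      simp only [pyrA]
      by_cases h0 : r = 0
      · simp [h0]
      · have hr1 : 0 ≤ r - 1 := by omega
        have hf1 : (r - 1).toNat < f1 := by omega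
        have hf2 : (r - 1).toNat < f2 := by omega
        rw [ih f2 (r - 1) c w hr1 hf1 hf2,
            ih f2 (r - 1) (c - 1) w hr1 hf1 hf2,
            ih f2 (r - 1) (c - 1) (PySem.Int.floordiv w 2) hr1 hf1 hf2]

theorem pyrA_eq_A (f : Nat) (r c w : Int) (hr : 0 ≤ r) (hf : r.toNat < f) :
    pyrA f r c w = HumanPyramid r c w := by
  exact pyrA_fuel_irrel f (r.toNat + 1) r c w hr hf (by omega)

-- the memo invariant: every cached entry is A's value at its key
def InvPyr (memo : PySem.Dict (Int × Int × Int) Int) : Prop :=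
  ∀ (r c w v : Int), memo.get? (r, c, w) = some v → 0 ≤ r ∧ v = HumanPyramid r c w

theorem InvPyr_insert (memo : PySem.Dict (Int × Int × Int) Int) (r c w : Int)
    (hr : 0 ≤ r) (hInv : InvPyr memo) :
    InvPyr (memo.insert (r, c, w) (HumanPyramid r c w)) := by
  intro r' c' w' v' hget
  rw [PySem.Dict.get?_insert] at hget
  split at hget
  · rename_i heq
    obtain ⟨h1, h2, h3⟩ : r' = r ∧ c' = c ∧ w' = w := by
      simpa [Prod.ext_iff] using heq
    subst h1; subst h2; subst h3
    exact ⟨hr, by simpa using hget.symm⟩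
  · exact hInv r' c' w' v' hget

-- main invariant: pyrB computes A's value and preserves the memo invariant
theorem pyrB_correct : ∀ (f : Nat) (r c w : Int) (memo : PySem.Dict (Int × Int × Int) Int),
    0 ≤ r → r.toNat < f → InvPyr memo →
    (pyrB f r c w memo).1 = HumanPyramid r c w ∧ InvPyr (pyrB f r c w memo).2 := by
  intro f
  induction f with
  | zero => intro r c w memo _ h _; omega
  | succ f ih =>
    intro r c w memo hr hf hInv
    by_cases h0 : r = 0
    · subst h0
      constructor
      · simp [pyrB, HumanPyramid, pyrA]
      · simpa [pyrB] using hInv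
    · have hA : HumanPyramid r c w = pyrA (f + 1) r c w :=
        (pyrA_eq_A (f + 1) r c w hr hf).symm
      have hr1 : 0 ≤ r - 1 := by omega
      have hf1 : (r - 1).toNat < f := by omega
      simp only [pyrB, if_neg h0]
      cases hm : memo.get? (r, c, w) with
      | some v =>
        have := hInv r c w v hm
        exact ⟨this.2, hInv⟩
      | none =>
        by_cases hc : c = 0
        · have h1 := ih (r - 1) c w memo hr1 hf1 hInv
          simp only [if_pos hc]
          have hval : PySem.Int.floordiv ((pyrB f (r - 1) c w memo).1 + w) 2
              = HumanPyramid r c w := by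
            rw [h1.1, hA]
            simp only [pyrA, if_neg h0, if_pos hc]
            rw [pyrA_eq_A f (r - 1) c w hr1 hf1]
          exact ⟨hval, by rw [hval]; exact InvPyr_insert _ r c w hr h1.2⟩
        · by_cases hrc : r = c
          · have h1 := ih (r - 1) (c - 1) w memo hr1 hf1 hInv
            simp only [if_neg hc, if_pos hrc]
            have hval : PySem.Int.floordiv ((pyrB f (r - 1) (c - 1) w memo).1 + w) 2
                = HumanPyramid r c w := by
              rw [h1.1, hA]
              simp only [pyrA, if_neg h0, if_neg hc, if_pos hrc]
              rw [pyrA_eq_A f (r - 1) (c - 1) w hr1 hf1]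
            exact ⟨hval, by rw [hval]; exact InvPyr_insert _ r c w hr h1.2⟩
          · have h1 := ih (r - 1) (c - 1) (PySem.Int.floordiv w 2) memo hr1 hf1 hInv
            have h2 := ih (r - 1) c w
              (pyrB f (r - 1) (c - 1) (PySem.Int.floordiv w 2) memo).2 hr1 hf1 h1.2
            simp only [if_neg hc, if_neg hrc]
            have hval : w + (pyrB f (r - 1) (c - 1) (PySem.Int.floordiv w 2) memo).1 +
                PySem.Int.floordiv
                  (pyrB f (r - 1) c w
                    (pyrB f (r - 1) (c - 1) (PySem.Int.floordiv w 2) memo).2).1 2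
                = HumanPyramid r c w := by
              rw [h1.1, h2.1, hA]
              simp only [pyrA, if_neg h0, if_neg hc, if_neg hrc]
              rw [pyrA_eq_A f (r - 1) c w hr1 hf1,
                  pyrA_eq_A f (r - 1) (c - 1) (PySem.Int.floordiv w 2) hr1 hf1]
              ring
            exact ⟨hval, by rw [hval]; exact InvPyr_insert _ r c w hr h2.2⟩

theorem InvPyr_empty : InvPyr PySem.Dict.empty := by
  intro r c w v h
  simp [PySem.Dict.get?_empty] at h

-- ===== VERDICT (by name: the statement is the Claim_ definition above) =====
theorem HumanPyramid_spec : Claim_equal_HumanPyramid := by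
  intro row column Weight _ hpre
  unfold Spec_HumanPyramid HumanPyramid_alt
  exact (pyrB_correct (row.toNat + 1) row column Weight PySem.Dict.empty hpre
    (by omega) InvPyr_empty).1.symm
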